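-- pv_equiv track=rewrite | github.com/captainnatebeard/convert | convert.py | encode
-- ===== SOURCE A (Python) =====
-- B64 = "ABCDEFGHIJKLMNOPQRSTUVWXYZabcdefghijklmnopqrstuvwxyz0123456789+/"
--
-- def encode(text, tob):
-- 	binary = ""
-- 	for i in text:
-- 		asciiText = ord(i)
-- 		binPoint = findBinPoint(asciiText)
-- 		for i in range(8 - binPoint):
-- 			binary += "0"
-- 		bin = tobin(asciiText, binPoint, "")
-- 		binary += bin
-- 	if tob:
-- 		final = binary
-- 	else:
-- 		final = tob64(binary)
-- 	return final
--
-- def findBinPoint(inpt):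
-- 	for i in [(128,8),(64,7),(32,6),(16,5),(8,4),(4,3),(2,2),(0,1)]:
-- 		if inpt >= i[0]:
-- 			return i[1]
--
-- def tobin(asciiText, binPoint, soFar):
-- 	if binPoint >= 1:
-- 		subBy = 2 ** (binPoint - 1)
-- 		binPoint = binPoint -1
-- 		if asciiText >= subBy:
-- 			soFar += "1"
-- 			asciiText = asciiText - subBy
-- 		else:
-- 			soFar += "0"
-- 		x = tobin(asciiText, binPoint, soFar)
-- 		return x
-- 	else:
-- 		return soFar
--
-- def tob64(binary):
-- 	final = ""
-- 	extras = 0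
-- 	if len(binary) % 6 != 0:
-- 		for i in range(6 - len(binary) % 6):
-- 			binary += "0"
-- 			extras += 1
-- 	cnt = 0
-- 	word = ""
-- 	for i in binary:
-- 		word += binary[cnt]
-- 		cnt += 1
-- 		if cnt % 6 == 0:
-- 			wordTotal = 0
-- 			x = 5
-- 			for i in word:
-- 				wordTotal += int(i) * (2 ** x)
-- 				x -= 1
-- 			word = ""
-- 			final += B64[wordTotal]
-- 			x = 6
-- 	for i in range(extras):
-- 		if i % 2 == 1:
-- 			final += '='
-- 	return final
-- ===== SOURCE B (Python) =====
-- B64 = "ABCDEFGHIJKLMNOPQRSTUVWXYZabcdefghijklmnopqrstuvwxyz0123456789+/"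
--
-- def encode(text, tob):
--     if tob:
--         return ''.join(format(ord(c), '08b') for c in text)
--     out = []
--     acc = 0
--     nbits = 0
--     for c in text:
--         acc = acc * 256 + ord(c)
--         nbits += 8
--         while nbits >= 6:
--             nbits -= 6
--             out.append(B64[acc >> nbits])
--             acc %= 1 << nbits
--     if nbits:
--         out.append(B64[(acc << (6 - nbits)) % 64])
--     out.append('=' * ((6 - 8 * len(text) % 6) % 6 // 2))
--     return ''.join(out)
-- ===== Notes on version B (the rewrite author's own statement) =====
-- stated objective: faster
-- what changed: Replaces A's bitstring pipeline (per-char greedy subtraction into a '0'/'1' string, zero-padding loop, then a 6-at-a-time re-scan with positional powers-of-two re-parsing) by a single streaming pass keeping an integer bit accumulator: each byte is shifted in and 6-bit groups are emitted arithmetically, with the leftover bits and '=' padding computed in closed form.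
import Mathlib
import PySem

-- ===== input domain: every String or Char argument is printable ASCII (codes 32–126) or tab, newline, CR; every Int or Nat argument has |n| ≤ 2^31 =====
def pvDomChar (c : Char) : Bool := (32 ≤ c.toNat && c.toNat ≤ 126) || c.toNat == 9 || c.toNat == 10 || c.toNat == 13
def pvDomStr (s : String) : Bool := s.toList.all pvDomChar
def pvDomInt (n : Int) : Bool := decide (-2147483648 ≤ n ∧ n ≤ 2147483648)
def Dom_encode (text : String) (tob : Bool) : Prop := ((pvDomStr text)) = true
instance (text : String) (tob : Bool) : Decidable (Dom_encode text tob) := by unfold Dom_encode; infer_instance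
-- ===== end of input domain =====

-- B replaces A's intermediate 8n-character bitstring and its 6-at-a-time re-parsing scan by one
-- streaming pass with an integer bit accumulator (objective: faster by constant factor).

-- ===== PORT A =====
def pvB64 : List Char := "ABCDEFGHIJKLMNOPQRSTUVWXYZabcdefghijklmnopqrstuvwxyz0123456789+/".toList

-- first pair (bound, bits) with inpt >= bound; Python would return None if nothing matched,
-- which cannot happen for inpt = ord(c) >= 0 (the last pair is (0,1)) — getD 0 is unreachable
def findBinPoint (inpt : Int) : Int :=
  ((([(128,8),(64,7),(32,6),(16,5),(8,4),(4,3),(2,2),(0,1)] : List (Int × Int)).find?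
      (fun p => decide (inpt ≥ p.1))).map Prod.snd).getD 0

-- A's tobin recurses with binPoint decreasing from ≥ 1 to 0; the recursion is structural on
-- binPoint.toNat (binPoint is always ≥ 0 here), so it is transcribed on that Nat:
-- fuel = binPoint, and 2 ** (binPoint - 1) = 2 ^ k at fuel k+1
def tobinAux (asciiText : Int) (fuel : Nat) (soFar : List Char) : List Char :=
  match fuel with
  | 0 => soFar
  | k + 1 =>
    let subBy : Int := 2 ^ k
    if asciiText ≥ subBy then tobinAux (asciiText - subBy) k (soFar ++ ['1'])
    else tobinAux asciiText k (soFar ++ ['0'])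

def tobin (asciiText : Int) (binPoint : Int) (soFar : List Char) : List Char :=
  tobinAux asciiText binPoint.toNat soFar

-- the inner 'for i in word: wordTotal += int(i) * (2 ** x); x -= 1' loop, state (wordTotal, x);
-- int(i) is int() of the one-character string (never raises here: word holds only '0'/'1')
def wordTotalLoop (word : List Char) : Int :=
  (word.foldl (fun (st : Int × Int) i =>
      (st.1 + ((PySem.Int.ofStr? (String.mk [i])).getD 0) * 2 ^ st.2.toNat, st.2 - 1)) (0, 5)).1

-- body of tob64's main loop, state (cnt, word, final); binary[cnt] is always in range
-- (cnt < len(binary)), and B64[wordTotal] is always in range, so getD is unreachable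
def tob64Body (binary : List Char) (st : Int × List Char × List Char) (_i : Char) :
    Int × List Char × List Char :=
  let word := st.2.1 ++ [(PySem.List.pyGet? binary st.1).getD ' ']
  let cnt := st.1 + 1
  if PySem.Int.mod cnt 6 = 0 then
    (cnt, [], st.2.2 ++ [(PySem.List.pyGet? pvB64 (wordTotalLoop word)).getD ' '])
  else (cnt, word, st.2.2)

def tob64 (binary0 : List Char) : List Char :=
  let p :=
    if PySem.Int.mod (binary0.length : Int) 6 ≠ 0 then
      (PySem.List.pyRange 0 (6 - PySem.Int.mod (binary0.length : Int) 6) 1).foldl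
        (fun (st : List Char × Int) _ => (st.1 ++ ['0'], st.2 + 1)) (binary0, 0)
    else (binary0, (0 : Int))
  let st := p.1.foldl (tob64Body p.1) (0, [], [])
  (PySem.List.pyRange 0 p.2 1).foldl
    (fun f i => if PySem.Int.mod i 2 = 1 then f ++ ['='] else f) st.2.2

def encode (text : String) (tob : Bool) : String :=
  let binary := text.toList.foldl (fun binary i =>
      let asciiText : Int := i.toNat
      let binPoint := findBinPoint asciiText
      let binary := (PySem.List.pyRange 0 (8 - binPoint) 1).foldl (fun b _ => b ++ ['0']) binary
      binary ++ tobin asciiText binPoint []) []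
  if tob then String.mk binary else String.mk (tob64 binary)

-- ===== PORT B =====
-- format(n, '08b') for n ≥ 0: binary digits left-padded with '0' to width 8
def fmt8 (n : Int) : List Char :=
  let ds := PySem.Int.toBinChars n
  List.replicate (8 - ds.length) '0' ++ ds

-- the 'while nbits >= 6' loop; acc and nbits are nonnegative Python ints, kept as Nat
def emitWhile (out : List Char) (acc : Nat) (nbits : Nat) : List Char × Nat × Nat :=
  if h : 6 ≤ nbits then
    let nbits' := nbits - 6
    emitWhile (out ++ [pvB64.getD (acc >>> nbits') ' ']) (acc % (1 <<< nbits')) nbits'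
  else (out, acc, nbits)
termination_by nbits
decreasing_by omega

def encode_alt (text : String) (tob : Bool) : String :=
  if tob then
    String.mk ((text.toList.map (fun c => fmt8 (c.toNat : Int))).flatten)
  else
    let st := text.toList.foldl
      (fun (st : List Char × Nat × Nat) c =>
        emitWhile st.1 (st.2.1 * 256 + c.toNat) (st.2.2 + 8)) ([], 0, 0)
    let out := if st.2.2 ≠ 0
      then st.1 ++ [pvB64.getD ((st.2.1 <<< (6 - st.2.2)) % 64) ' '] else st.1
    String.mk (out ++ List.replicate ((6 - 8 * text.toList.length % 6) % 6 / 2) '=')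

-- ===== PRECONDITION & SPEC =====
def Spec_encode (text : String) (tob : Bool) (out : String) : Prop := out = encode_alt text tob
instance (text : String) (tob : Bool) (out : String) : Decidable (Spec_encode text tob out) := by unfold Spec_encode; infer_instance

-- ===== CLAIM (what is proved, stated in full; the proofs are below) =====
def Claim_equal_encode : Prop := ∀ (text : String) (tob : Bool), Dom_encode text tob → Spec_encode text tob (encode text tob)

-- ===== LEMMAS AND PROOFS =====

-- canonical intermediate description shared by both proofs: the bit value of a '0'/'1' string,
-- its 6-character chunks, and the base64 character of a chunk
def pvBit (c : Char) : Bool := c = '0' || c = '1'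
def pvVal (l : List Char) : Nat := l.foldl (fun a c => 2 * a + (if c = '1' then 1 else 0)) 0
def pvChunks (l : List Char) : List (List Char) :=
  if h : l = [] then [] else l.take 6 :: pvChunks (l.drop 6)
termination_by l.length
decreasing_by
  have hl : l.length ≠ 0 := fun hl => h (List.eq_nil_of_length_eq_zero hl)
  simp [List.length_drop]; omega
def pvEmit (w : List Char) : Char := pvB64.getD (pvVal w) ' '
def pvCanon (bits : List Char) : List Char := (pvChunks bits).map pvEmit
def pvBits (cs : List Nat) : List Char := (cs.map (fun n => fmt8 ((n : Nat) : Int))).flatten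

-- ---- small facts about fmt8 (all by finite check over the byte range) ----
lemma fmt8_len : ∀ n : Nat, n < 128 → (fmt8 (n : Int)).length = 8 := by decide
lemma fmt8_bits : ∀ n : Nat, n < 128 → (fmt8 (n : Int)).all pvBit = true := by decide
lemma fmt8_take2 : ∀ n : Nat, n < 128 → pvVal ((fmt8 (n : Int)).take 2) = n / 64 := by decide
lemma fmt8_drop2 : ∀ n : Nat, n < 128 → pvVal ((fmt8 (n : Int)).drop 2) = n % 64 := by decide
lemma fmt8_take4 : ∀ n : Nat, n < 128 → pvVal ((fmt8 (n : Int)).take 4) = n / 16 := by decide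
lemma fmt8_drop4 : ∀ n : Nat, n < 128 → pvVal ((fmt8 (n : Int)).drop 4) = n % 16 := by decide
lemma fmt8_take6 : ∀ n : Nat, n < 128 → pvVal ((fmt8 (n : Int)).take 6) = n / 4 := by decide
lemma fmt8_drop6 : ∀ n : Nat, n < 128 → pvVal ((fmt8 (n : Int)).drop 6) = n % 4 := by decide

-- A's per-character work (zero-padding loop + tobin) produces exactly fmt8
lemma perChar : ∀ n : Nat, n < 128 →
    (PySem.List.pyRange 0 (8 - findBinPoint (n : Int)) 1).flatMap (fun _ => ['0']) ++
      tobin (n : Int) (findBinPoint (n : Int)) [] = fmt8 (n : Int) := by decide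

-- ---- pvVal ----
lemma pvVal_foldl (l : List Char) : ∀ a : Nat,
    l.foldl (fun a c => 2 * a + (if c = '1' then 1 else 0)) a = a * 2 ^ l.length + pvVal l := by
  induction l with
  | nil => simp [pvVal]
  | cons c l ih =>
    intro a
    have h1 := ih (2 * a + (if c = '1' then 1 else 0))
    have h2 := ih (2 * 0 + (if c = '1' then 1 else 0))
    simp only [List.foldl_cons, pvVal] at *
    rw [h1, h2]
    simp only [List.length_cons, pow_succ]
    ring

lemma pvVal_append (xs ys : List Char) :
    pvVal (xs ++ ys) = pvVal xs * 2 ^ ys.length + pvVal ys := by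
  unfold pvVal
  rw [List.foldl_append, pvVal_foldl]
  rfl

lemma pvVal_lt (l : List Char) (h : l.all pvBit = true) : pvVal l < 2 ^ l.length := by
  induction l with
  | nil => simp [pvVal]
  | cons c l ih =>
    simp only [List.all_cons, Bool.and_eq_true] at h
    have hv := ih h.2
    have hc : (if c = '1' then 1 else 0) ≤ 1 := by split <;> omega
    have : pvVal (c :: l) = (if c = '1' then 1 else 0) * 2 ^ l.length + pvVal l := by
      simp only [pvVal, List.foldl_cons]
      rw [pvVal_foldl]
      simp only [Nat.mul_zero, Nat.zero_add]
      rfl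
    rw [this]
    simp only [List.length_cons, pow_succ]
    nlinarith

lemma pvVal_replicate_zero (k : Nat) : pvVal (List.replicate k '0') = 0 := by
  induction k with
  | zero => rfl
  | succ k ih =>
    rw [List.replicate_succ', pvVal_append, ih]
    have h0 : pvVal ['0'] = 0 := by decide
    simp [h0]

-- ---- pvChunks ----
lemma pvChunks_nil : pvChunks [] = [] := by unfold pvChunks; simp

lemma pvChunks_append6 (xs ys : List Char) (h : xs.length = 6) :
    pvChunks (xs ++ ys) = xs :: pvChunks ys := by
  rw [pvChunks]
  have hne : xs ++ ys ≠ [] := by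
    intro hx; have := congrArg List.length hx; simp [h] at this
  rw [dif_neg hne]
  congr 1
  · rw [List.take_left' h]
  · congr 1
    rw [List.drop_left' h]

lemma pvChunks_of_len6 (xs : List Char) (h : xs.length = 6) : pvChunks xs = [xs] := by
  have := pvChunks_append6 xs [] h
  simpa [pvChunks_nil] using this

-- ---- A's word loop equals pvEmit on a 6-character binary word ----
lemma emitA (w : List Char) (h6 : w.length = 6) (hb : w.all pvBit = true) :
    (PySem.List.pyGet? pvB64 (wordTotalLoop w)).getD ' ' = pvEmit w := by
  match w, h6 with
  | [a, b, c, d, e, f], _ =>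
    simp only [List.all_cons, List.all_nil, Bool.and_eq_true, pvBit, Bool.or_eq_true,
      decide_eq_true_eq, beq_iff_eq, and_true] at hb
    obtain ⟨ha, hb', hc, hd, he, hf⟩ := hb
    rcases ha with rfl | rfl <;> rcases hb' with rfl | rfl <;> rcases hc with rfl | rfl <;>
      rcases hd with rfl | rfl <;> rcases he with rfl | rfl <;> rcases hf with rfl | rfl <;>
      decide

-- one step of A's tob64 loop with the lookup resolved and cnt a Nat cast
lemma body_step (full : List Char) (k : Nat) (w f : List Char) (x ch : Char)
    (hg : full[k]? = some ch) :
    tob64Body full ((k : Int), w, f) x =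
      if (k + 1) % 6 = 0 then
        (((k + 1 : Nat) : Int), [],
          f ++ [(PySem.List.pyGet? pvB64 (wordTotalLoop (w ++ [ch]))).getD ' '])
      else (((k + 1 : Nat) : Int), w ++ [ch], f) := by
  simp only [tob64Body]
  have h1 : ((k : Int) + 1) = (((k + 1 : Nat)) : Int) := by push_cast; ring
  rw [h1, PySem.Int.mod_eq_emod_of_pos (by norm_num)]
  have h2 : ((((k + 1 : Nat)) : Int)) % 6 = ((((k + 1) % 6 : Nat)) : Int) := by omega
  rw [h2]
  simp only [PySem.List.pyGet?_natCast, hg, Option.getD_some, Nat.cast_eq_zero]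

-- ---- A's main tob64 loop ----
lemma loopMain (full : List Char) : ∀ (n : Nat) (l : List Char) (k : Nat) (final : List Char),
    l.length = 6 * n → full.drop k = l → k % 6 = 0 → l.all pvBit = true →
    l.foldl (tob64Body full) ((k : Int), [], final) =
      ((k : Int) + l.length, [], final ++ pvCanon l) := by
  intro n
  induction n with
  | zero =>
    intro l k final hlen _ _ _
    have hnil : l = [] := List.eq_nil_of_length_eq_zero (by omega)
    subst hnil
    simp [pvCanon, pvChunks_nil]
  | succ n ih =>
    intro l k final hlen hd hk hbit
    match l, hlen, hd, hbit with
    | a :: b :: c :: d :: e :: f :: rest, hlen, hd, hbit =>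
      have hg : ∀ i : Nat, i < 6 → full[k + i]? = ([a, b, c, d, e, f] ++ rest)[i]? := by
        intro i _
        rw [← List.getElem?_drop, hd]
        rfl
      have hg0 : full[k]? = some a := by have := hg 0 (by omega); simpa using this
      have hg1 : full[k + 1]? = some b := by have := hg 1 (by omega); simpa using this
      have hg2 : full[k + 2]? = some c := by have := hg 2 (by omega); simpa using this
      have hg3 : full[k + 3]? = some d := by have := hg 3 (by omega); simpa using this
      have hg4 : full[k + 4]? = some e := by have := hg 4 (by omega); simpa using this
      have hg5 : full[k + 5]? = some f := by have := hg 5 (by omega); simpa using this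
      simp only [List.foldl_cons]
      rw [body_step full k [] final _ a hg0, if_neg (by omega)]
      simp only [List.cons_append, List.nil_append]
      rw [body_step full (k + 1) [a] final _ b (by simpa using hg1), if_neg (by omega)]
      simp only [List.cons_append, List.nil_append]
      rw [body_step full (k + 2) [a, b] final _ c (by simpa using hg2), if_neg (by omega)]
      simp only [List.cons_append, List.nil_append]
      rw [body_step full (k + 3) [a, b, c] final _ d (by simpa using hg3), if_neg (by omega)]
      simp only [List.cons_append, List.nil_append]
      rw [body_step full (k + 4) [a, b, c, d] final _ e (by simpa using hg4), if_neg (by omega)]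
      simp only [List.cons_append, List.nil_append]
      rw [body_step full (k + 5) [a, b, c, d, e] final _ f (by simpa using hg5),
        if_pos (by omega)]
      simp only [List.cons_append, List.nil_append]
      simp only [List.all_cons, Bool.and_eq_true] at hbit
      rw [emitA [a, b, c, d, e, f] (by simp) (by simp_all)]
      have hlen' : rest.length = 6 * n := by
        simp only [List.length_cons] at hlen; omega
      have hd' : full.drop (k + 6) = rest := by
        have h6 := congrArg (List.drop 6) hd
        rw [List.drop_drop] at h6
        simpa [Nat.add_comm] using h6
      have hbit' : rest.all pvBit = true := hbit.2.2.2.2.2.2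
      rw [ih rest (k + 6) (final ++ [pvEmit [a, b, c, d, e, f]]) hlen' hd' (by omega) hbit']
      have hcanon : pvCanon (a :: b :: c :: d :: e :: f :: rest) =
          pvEmit [a, b, c, d, e, f] :: pvCanon rest := by
        have : a :: b :: c :: d :: e :: f :: rest = [a, b, c, d, e, f] ++ rest := rfl
        rw [this]
        unfold pvCanon
        rw [pvChunks_append6 _ _ (by simp)]
        rfl
      rw [hcanon]
      refine Prod.ext ?_ (Prod.ext ?_ ?_) <;> simp <;> push_cast <;> ring

-- ---- A's padding loop ----
lemma padLoop (k : Nat) (bin : List Char) (e : Int) :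
    (PySem.List.pyRange 0 (k : Int) 1).foldl
        (fun (st : List Char × Int) _ => (st.1 ++ ['0'], st.2 + 1)) (bin, e) =
      (bin ++ List.replicate k '0', e + k) := by
  rw [PySem.List.pyRange_one]
  have hk : ((k : Int) - 0).toNat = k := by omega
  rw [hk]
  induction k with
  | zero => simp
  | succ k ih =>
    rw [List.range_succ, List.map_append, List.foldl_append, ih (by omega)]
    simp only [List.map_cons, List.map_nil, List.foldl_cons, List.foldl_nil,
      List.replicate_succ', Prod.mk.injEq]
    refine ⟨by simp, by push_cast; ring⟩

-- ---- A's '=' loop: one '=' per odd index below e ----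
lemma eqLoop (e : Nat) (f : List Char) :
    (PySem.List.pyRange 0 (e : Int) 1).foldl
        (fun f i => if PySem.Int.mod i 2 = 1 then f ++ ['='] else f) f =
      f ++ List.replicate (e / 2) '=' := by
  rw [PySem.List.pyRange_one]
  have hk : ((e : Int) - 0).toNat = e := by omega
  rw [hk]
  induction e with
  | zero => simp
  | succ k ih =>
    rw [List.range_succ, List.map_append, List.foldl_append, ih (by omega)]
    simp only [List.map_cons, List.map_nil, List.foldl_cons, List.foldl_nil]
    have hmod : PySem.Int.mod (0 + (k : Int)) 2 = ((k % 2 : Nat) : Int) := by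
      rw [PySem.Int.mod_eq_emod_of_pos (by norm_num)]
      omega
    rw [hmod]
    split
    · rename_i hcond
      have hk1 : k % 2 = 1 := by exact_mod_cast hcond
      have hdiv : (k + 1) / 2 = k / 2 + 1 := by omega
      rw [hdiv, List.append_assoc, ← List.replicate_succ']
    · rename_i hcond
      have hk1 : ¬ k % 2 = 1 := by exact_mod_cast hcond
      have hdiv : (k + 1) / 2 = k / 2 := by omega
      rw [hdiv]

-- ---- characterisation of A's tob64 ----
lemma tob64_eq (bits : List Char) (hb : bits.all pvBit = true) :
    tob64 bits =
      pvCanon (bits ++ List.replicate ((6 - bits.length % 6) % 6) '0') ++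
        List.replicate ((6 - bits.length % 6) % 6 / 2) '=' := by
  unfold tob64
  have hmod : PySem.Int.mod (bits.length : Int) 6 = ((bits.length % 6 : Nat) : Int) := by
    rw [PySem.Int.mod_eq_emod_of_pos (by norm_num)]
    omega
  rw [hmod]
  by_cases h6 : bits.length % 6 = 0
  · rw [if_neg (by simp [h6])]
    have hloop := loopMain bits (bits.length / 6) bits 0 [] (by omega) (by simp) (by omega) hb
    simp only [Nat.cast_zero] at hloop
    have h00 : ((0 : Int)) = ((0 : Nat) : Int) := rfl
    simp only [hloop]
    simp only [h00, eqLoop]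
    rw [h6]
    simp
  · rw [if_pos (by exact_mod_cast h6)]
    have e := 6 - bits.length % 6
    have hcast : (6 - ((bits.length % 6 : Nat) : Int)) = ((6 - bits.length % 6 : Nat) : Int) := by
      omega
    rw [hcast, padLoop (6 - bits.length % 6) bits 0]
    have hemod : (6 - bits.length % 6) % 6 = 6 - bits.length % 6 := by omega
    rw [hemod]
    have hpadbit : (bits ++ List.replicate (6 - bits.length % 6) '0').all pvBit = true := by
      rw [List.all_append, hb]
      simp only [Bool.true_and, List.all_eq_true]
      intro x hx
      rw [List.eq_of_mem_replicate hx]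
      rfl
    have hpadlen : (bits ++ List.replicate (6 - bits.length % 6) '0').length =
        6 * ((bits.length + (6 - bits.length % 6)) / 6) := by
      simp only [List.length_append, List.length_replicate]
      omega
    have hloop := loopMain (bits ++ List.replicate (6 - bits.length % 6) '0')
      ((bits.length + (6 - bits.length % 6)) / 6)
      (bits ++ List.replicate (6 - bits.length % 6) '0') 0 [] hpadlen (by simp) (by omega)
      hpadbit
    simp only [Nat.cast_zero] at hloop
    simp only [hloop, zero_add, eqLoop]
    simp

-- ---- A's binary-building loop ----
lemma encodeBinary (cs : List Char) (h : ∀ c ∈ cs, c.toNat < 128) :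
    cs.foldl (fun binary i =>
      let asciiText : Int := i.toNat
      let binPoint := findBinPoint asciiText
      let binary := (PySem.List.pyRange 0 (8 - binPoint) 1).foldl (fun b _ => b ++ ['0']) binary
      binary ++ tobin asciiText binPoint []) [] = pvBits (cs.map Char.toNat) := by
  have aux : ∀ (ds : List Char), (∀ c ∈ ds, c.toNat < 128) → ∀ acc : List Char,
      ds.foldl (fun binary i =>
        let asciiText : Int := i.toNat
        let binPoint := findBinPoint asciiText
        let binary := (PySem.List.pyRange 0 (8 - binPoint) 1).foldl (fun b _ => b ++ ['0']) binary
        binary ++ tobin asciiText binPoint []) acc =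
      acc ++ ds.flatMap (fun c => fmt8 ((c.toNat : Nat) : Int)) := by
    intro ds
    induction ds with
    | nil => intro _ acc; simp
    | cons c cs ih =>
      intro hd acc
      have h128 : c.toNat < 128 := hd c List.mem_cons_self
      simp only [List.foldl_cons]
      rw [PySem.List.foldl_append_eq_flatMap (fun _ => ['0']), List.append_assoc,
        perChar c.toNat h128, ih (fun x hx => hd x (List.mem_cons_of_mem _ hx))]
      simp [List.append_assoc]
  rw [aux cs h [], List.nil_append, List.flatMap_def]
  unfold pvBits
  rw [List.map_map]
  rfl

-- pvCanon of a leading 6-chunk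
lemma pvCanon_cons (xs q : List Char) (h : xs.length = 6) :
    pvCanon (xs ++ q) = pvEmit xs :: pvCanon q := by
  unfold pvCanon
  rw [pvChunks_append6 _ _ h]
  rfl

-- one byte shifted into an empty accumulator: emit the 6 high bits, keep the 2 low bits
lemma step_len0 (out : List Char) (b : Nat) (hb : b < 128) :
    emitWhile out b (0 + 8) =
      (out ++ [pvEmit ((fmt8 (b : Int)).take 6)], pvVal ((fmt8 (b : Int)).drop 6), 2) := by
  rw [emitWhile]
  rw [dif_pos (by omega)]
  rw [emitWhile]
  rw [dif_neg (by omega)]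
  have h1 : b >>> (0 + 8 - 6) = pvVal ((fmt8 (b : Int)).take 6) := by
    rw [Nat.shiftRight_eq_div_pow, fmt8_take6 b hb]
  have h2 : b % (1 <<< (0 + 8 - 6)) = pvVal ((fmt8 (b : Int)).drop 6) := by
    rw [Nat.one_shiftLeft, fmt8_drop6 b hb]
  rw [h1, h2]
  simp [pvEmit]

-- one byte shifted into a 2-bit accumulator: emit one 6-bit group, keep 4 bits
lemma step_len2 (out rem : List Char) (b : Nat) (hb : b < 128)
    (hr : rem.length = 2) (hbit : rem.all pvBit = true) :
    emitWhile out (pvVal rem * 256 + b) (2 + 8) =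
      (out ++ [pvEmit (rem ++ (fmt8 (b : Int)).take 4)], pvVal ((fmt8 (b : Int)).drop 4), 4) := by
  have hv : pvVal rem < 4 := by
    have := pvVal_lt rem hbit; rw [hr] at this; norm_num at this; exact this
  rw [emitWhile]
  rw [dif_pos (by omega)]
  rw [emitWhile]
  rw [dif_neg (by omega)]
  have h1 : (pvVal rem * 256 + b) >>> (2 + 8 - 6) = pvVal (rem ++ (fmt8 (b : Int)).take 4) := by
    rw [Nat.shiftRight_eq_div_pow, pvVal_append, List.length_take, fmt8_len b hb,
      fmt8_take4 b hb]
    norm_num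
    omega
  have h2 : (pvVal rem * 256 + b) % (1 <<< (2 + 8 - 6)) = pvVal ((fmt8 (b : Int)).drop 4) := by
    rw [Nat.one_shiftLeft, fmt8_drop4 b hb]
    norm_num
    omega
  rw [h1, h2]
  simp [pvEmit]

-- one byte shifted into a 4-bit accumulator: emit two 6-bit groups, accumulator empties
lemma step_len4 (out rem : List Char) (b : Nat) (hb : b < 128)
    (hr : rem.length = 4) (hbit : rem.all pvBit = true) :
    emitWhile out (pvVal rem * 256 + b) (4 + 8) =
      (out ++ [pvEmit (rem ++ (fmt8 (b : Int)).take 2), pvEmit ((fmt8 (b : Int)).drop 2)],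
        pvVal ([] : List Char), 0) := by
  have hv : pvVal rem < 16 := by
    have := pvVal_lt rem hbit; rw [hr] at this; norm_num at this; exact this
  rw [emitWhile]
  rw [dif_pos (by omega)]
  rw [emitWhile]
  rw [dif_pos (by omega)]
  rw [emitWhile]
  rw [dif_neg (by omega)]
  have h1 : (pvVal rem * 256 + b) >>> (4 + 8 - 6) = pvVal (rem ++ (fmt8 (b : Int)).take 2) := by
    rw [Nat.shiftRight_eq_div_pow, pvVal_append, List.length_take, fmt8_len b hb,
      fmt8_take2 b hb]
    norm_num
    omega
  have h2 : (pvVal rem * 256 + b) % (1 <<< (4 + 8 - 6)) = b % 64 := by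
    rw [Nat.one_shiftLeft]
    norm_num
    omega
  have h3 : (b % 64) >>> (4 + 8 - 6 - 6) = pvVal ((fmt8 (b : Int)).drop 2) := by
    rw [Nat.shiftRight_eq_div_pow, fmt8_drop2 b hb]
    norm_num
  have h4 : (b % 64) % (1 <<< (4 + 8 - 6 - 6)) = pvVal ([] : List Char) := by
    simp [Nat.one_shiftLeft, pvVal]
    omega
  rw [h1, h2, h3, h4]
  simp [pvEmit, List.append_assoc]

-- ---- B's streaming loop ----
lemma streamLoop : ∀ (cs : List Char), (∀ c ∈ cs, c.toNat < 128) →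
    ∀ (rem : List Char), rem.all pvBit = true →
      (rem.length = 0 ∨ rem.length = 2 ∨ rem.length = 4) → ∀ out : List Char,
    ∃ q r : List Char,
      rem ++ pvBits (cs.map Char.toNat) = q ++ r ∧
      (∀ s, pvChunks (q ++ s) = pvChunks q ++ pvChunks s) ∧
      r.all pvBit = true ∧
      r.length = (rem.length + 8 * cs.length) % 6 ∧
      cs.foldl (fun (st : List Char × Nat × Nat) c =>
          emitWhile st.1 (st.2.1 * 256 + c.toNat) (st.2.2 + 8)) (out, pvVal rem, rem.length) =
        (out ++ pvCanon q, pvVal r, r.length) := by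
  intro cs
  induction cs with
  | nil =>
    intro _ rem hbit hlen out
    refine ⟨[], rem, by simp [pvBits], by simp [pvChunks_nil], hbit,
      by rcases hlen with h | h | h <;> simp [h],
      by simp [pvCanon, pvChunks_nil]⟩
  | cons ch cs ih =>
    intro hcs rem hbit hlen out
    have hb : ch.toNat < 128 := hcs ch List.mem_cons_self
    have hcs' : ∀ c ∈ cs, c.toNat < 128 := fun c hc => hcs c (List.mem_cons_of_mem _ hc)
    have hbits8 : pvBits ((ch :: cs).map Char.toNat) =
        fmt8 (ch.toNat : Int) ++ pvBits (cs.map Char.toNat) := rfl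
    have hall := fmt8_bits ch.toNat hb
    rw [List.all_eq_true] at hall
    simp only [List.foldl_cons]
    rcases hlen with h0 | h2 | h4
    · -- accumulator empty
      have hrem : rem = [] := List.eq_nil_of_length_eq_zero h0
      subst hrem
      have hacc : pvVal ([] : List Char) * 256 + ch.toNat = ch.toNat := by simp [pvVal]
      rw [show ([] : List Char).length = 0 from rfl, hacc, step_len0 out ch.toNat hb]
      have hbit' : ((fmt8 (ch.toNat : Int)).drop 6).all pvBit = true := by
        rw [List.all_eq_true]
        exact fun x hx => hall x (List.mem_of_mem_drop hx)
      have hlen' : ((fmt8 (ch.toNat : Int)).drop 6).length = 2 := by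
        rw [List.length_drop, fmt8_len ch.toNat hb]
      have ht6 : ((fmt8 (ch.toNat : Int)).take 6).length = 6 := by
        rw [List.length_take, fmt8_len ch.toNat hb]
        norm_num
      obtain ⟨q, r, heq, hch, hrb, hrl, hfold⟩ :=
        ih hcs' ((fmt8 (ch.toNat : Int)).drop 6) hbit' (Or.inr (Or.inl hlen'))
          (out ++ [pvEmit ((fmt8 (ch.toNat : Int)).take 6)])
      rw [hlen'] at hfold
      refine ⟨(fmt8 (ch.toNat : Int)).take 6 ++ q, r, ?_, ?_, hrb, ?_, ?_⟩
      · rw [List.nil_append, hbits8]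
        conv_lhs => rw [← List.take_append_drop 6 (fmt8 (ch.toNat : Int))]
        simp only [List.append_assoc]
        rw [heq]
      · intro s
        rw [List.append_assoc, pvChunks_append6 _ _ ht6, pvChunks_append6 _ _ ht6, hch s]
        rfl
      · rw [hrl, hlen']; simp [List.length_cons]; omega
      · rw [hfold, pvCanon_cons _ _ ht6]
        simp [List.append_assoc]
    · -- 2 leftover bits
      rw [h2, step_len2 out rem ch.toNat hb h2 hbit]
      have hbit' : ((fmt8 (ch.toNat : Int)).drop 4).all pvBit = true := by
        rw [List.all_eq_true]
        exact fun x hx => hall x (List.mem_of_mem_drop hx)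
      have hlen' : ((fmt8 (ch.toNat : Int)).drop 4).length = 4 := by
        rw [List.length_drop, fmt8_len ch.toNat hb]
      have ht6 : (rem ++ (fmt8 (ch.toNat : Int)).take 4).length = 6 := by
        rw [List.length_append, List.length_take, fmt8_len ch.toNat hb, h2]
        norm_num
      obtain ⟨q, r, heq, hch, hrb, hrl, hfold⟩ :=
        ih hcs' ((fmt8 (ch.toNat : Int)).drop 4) hbit' (Or.inr (Or.inr hlen'))
          (out ++ [pvEmit (rem ++ (fmt8 (ch.toNat : Int)).take 4)])
      rw [hlen'] at hfold
      refine ⟨(rem ++ (fmt8 (ch.toNat : Int)).take 4) ++ q, r, ?_, ?_, hrb, ?_, ?_⟩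
      · rw [hbits8]
        conv_lhs => rw [← List.take_append_drop 4 (fmt8 (ch.toNat : Int))]
        simp only [List.append_assoc]
        rw [heq]
      · intro s
        rw [List.append_assoc, pvChunks_append6 _ _ ht6, pvChunks_append6 _ _ ht6, hch s]
        rfl
      · rw [hrl, hlen']; simp [List.length_cons]; omega
      · rw [hfold, pvCanon_cons _ _ ht6]
        simp [List.append_assoc]
    · -- 4 leftover bits
      rw [h4, step_len4 out rem ch.toNat hb h4 hbit]
      have hlen' : ((fmt8 (ch.toNat : Int)).drop 2).length = 6 := by
        rw [List.length_drop, fmt8_len ch.toNat hb]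
      have ht6 : (rem ++ (fmt8 (ch.toNat : Int)).take 2).length = 6 := by
        rw [List.length_append, List.length_take, fmt8_len ch.toNat hb, h4]
        norm_num
      obtain ⟨q, r, heq, hch, hrb, hrl, hfold⟩ :=
        ih hcs' [] (by rfl) (Or.inl rfl)
          (out ++ [pvEmit (rem ++ (fmt8 (ch.toNat : Int)).take 2),
            pvEmit ((fmt8 (ch.toNat : Int)).drop 2)])
      rw [List.nil_append] at heq
      simp only [List.length_nil] at hfold
      refine ⟨(rem ++ (fmt8 (ch.toNat : Int)).take 2) ++ ((fmt8 (ch.toNat : Int)).drop 2 ++ q),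
        r, ?_, ?_, hrb, ?_, ?_⟩
      · rw [hbits8]
        conv_lhs => rw [← List.take_append_drop 2 (fmt8 (ch.toNat : Int))]
        simp only [List.append_assoc]
        rw [heq]
      · intro s
        rw [List.append_assoc, pvChunks_append6 _ _ ht6, pvChunks_append6 _ _ ht6,
          List.append_assoc, pvChunks_append6 _ _ hlen', pvChunks_append6 _ _ hlen', hch s]
        rfl
      · rw [hrl]; simp [List.length_cons]; omega
      · rw [hfold, pvCanon_cons _ _ ht6, pvCanon_cons _ _ hlen']
        simp [List.append_assoc]

lemma pvBits_len (cs : List Nat) (h : ∀ n ∈ cs, n < 128) :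
    (pvBits cs).length = 8 * cs.length := by
  induction cs with
  | nil => rfl
  | cons n cs ih =>
    simp only [List.mem_cons, forall_eq_or_imp] at h
    have hsplit : pvBits (n :: cs) = fmt8 (n : Int) ++ pvBits cs := rfl
    rw [hsplit, List.length_append, ih h.2, fmt8_len n h.1, List.length_cons]
    ring

lemma pvBits_bits (cs : List Nat) (h : ∀ n ∈ cs, n < 128) :
    (pvBits cs).all pvBit = true := by
  induction cs with
  | nil => rfl
  | cons n cs ih =>
    simp only [List.mem_cons, forall_eq_or_imp] at h
    have hsplit : pvBits (n :: cs) = fmt8 (n : Int) ++ pvBits cs := rfl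
    rw [hsplit, List.all_append, fmt8_bits n h.1, ih h.2]
    rfl

lemma dom_codes (text : String) (h : pvDomStr text = true) :
    ∀ c ∈ text.toList, c.toNat < 128 := by
  unfold pvDomStr at h
  intro c hc
  have := List.all_eq_true.mp h c hc
  simp only [pvDomChar, Bool.or_eq_true, Bool.and_eq_true, decide_eq_true_eq, beq_iff_eq] at this
  omega

-- ===== VERDICT (by name: the statement is the Claim_ definition above) =====
theorem encode_spec : Claim_equal_encode := by
  unfold Claim_equal_encode Spec_encode
  intro text tob hdom
  unfold Dom_encode at hdom
  have hcodes : ∀ c ∈ text.toList, c.toNat < 128 := dom_codes text hdom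
  have hcodes' : ∀ n ∈ text.toList.map Char.toNat, n < 128 := by
    intro n hn
    obtain ⟨c, hc, rfl⟩ := List.mem_map.mp hn
    exact hcodes c hc
  have hmapmap : pvBits (text.toList.map Char.toNat) =
      (text.toList.map (fun c => fmt8 ((c.toNat : Nat) : Int))).flatten := by
    unfold pvBits
    rw [List.map_map]
    rfl
  cases tob with
  | true =>
    simp only [encode, encode_alt, if_pos]
    rw [encodeBinary text.toList hcodes, hmapmap]
  | false =>
    simp only [encode, encode_alt, Bool.false_eq_true, if_false]
    rw [encodeBinary text.toList hcodes,
      tob64_eq _ (pvBits_bits (text.toList.map Char.toNat) hcodes')]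
    have hlen8 : (pvBits (text.toList.map Char.toNat)).length = 8 * text.toList.length := by
      rw [pvBits_len _ hcodes', List.length_map]
    obtain ⟨q, r, heq, hch, hrb, hrl, hfold⟩ :=
      streamLoop text.toList hcodes [] rfl (Or.inl rfl) []
    simp only [List.length_nil, Nat.zero_add] at hrl
    rw [List.nil_append] at heq
    simp only [List.length_nil] at hfold
    have h0v : pvVal ([] : List Char) = 0 := rfl
    rw [h0v] at hfold
    rw [hfold]
    simp only [List.nil_append]
    rw [hlen8, heq]
    by_cases hr0 : r.length = 0
    · -- no leftover bits: no tail character, no '='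
      have hrnil : r = [] := List.eq_nil_of_length_eq_zero hr0
      have he : (6 - 8 * text.toList.length % 6) % 6 = 0 := by
        rw [hr0] at hrl; omega
      rw [if_neg (by omega), he]
      subst hrnil
      simp
    · -- leftover bits: one tail character and (6-rl)/2 '=' signs
      have hrl26 : r.length = 2 ∨ r.length = 4 := by omega
      have he : (6 - 8 * text.toList.length % 6) % 6 = 6 - r.length := by omega
      rw [if_pos (by omega), he]
      have hw6 : (r ++ List.replicate (6 - r.length) '0').length = 6 := by
        rw [List.length_append, List.length_replicate]; omega
      have hcanonsplit :
          pvCanon (q ++ r ++ List.replicate (6 - r.length) '0') =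
            pvCanon q ++ [pvEmit (r ++ List.replicate (6 - r.length) '0')] := by
        rw [List.append_assoc]
        unfold pvCanon
        rw [hch, pvChunks_of_len6 _ hw6]
        simp
      rw [hcanonsplit]
      have hemit : pvB64.getD ((pvVal r <<< (6 - r.length)) % 64) ' ' =
          pvEmit (r ++ List.replicate (6 - r.length) '0') := by
        have hvlt : pvVal r < 2 ^ r.length := pvVal_lt r hrb
        have hvr : pvVal (r ++ List.replicate (6 - r.length) '0') =
            pvVal r * 2 ^ (6 - r.length) := by
          rw [pvVal_append, pvVal_replicate_zero, List.length_replicate]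
          ring
        have hmod64 : (pvVal r * 2 ^ (6 - r.length)) % 64 = pvVal r * 2 ^ (6 - r.length) := by
          apply Nat.mod_eq_of_lt
          rcases hrl26 with h | h <;> rw [h] at hvlt ⊢ <;> norm_num <;> try omega
        rw [Nat.shiftLeft_eq, hmod64, pvEmit, hvr]
      rw [hemit]
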